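-- pv_equiv track=rewrite | github.com/curiosity-ai/privacy-filter | .reference/opf/_eval/runner.py | _first_text_mismatch
-- ===== SOURCE A (Python) =====
-- def _first_text_mismatch(left: str, right: str) -> int | None:
--     """Return the first differing character index between two strings."""
--     min_len = min(len(left), len(right))
--     for idx in range(min_len):
--         if left[idx] != right[idx]:
--             return idx
--     if len(left) != len(right):
--         return min_len
--     return None
-- ===== SOURCE B (Python) =====
-- def _first_text_mismatch(left: str, right: str) -> int | None:
--     """Return the first differing character index between two strings."""
--     # Binary search for the length of the common leading prefix: prefix
--     # agreement is monotone in the length, and each probe compares whole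
--     # slices at once instead of scanning character by character.
--     lo, hi = 0, min(len(left), len(right))
--     while lo < hi:
--         mid = (lo + hi + 1) // 2
--         if left[:mid] == right[:mid]:
--             lo = mid
--         else:
--             hi = mid - 1
--     if lo == len(left) == len(right):
--         return None
--     return lo
-- ===== Notes on version B (the rewrite author's own statement) =====
-- stated objective: alternative
-- what changed: B binary-searches the common-prefix length using whole-slice equality probes (correct because prefix agreement is monotone in the length), replacing A's character-by-character index loop; the tail decides None-vs-index from lengths alone.
import Mathlib
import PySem

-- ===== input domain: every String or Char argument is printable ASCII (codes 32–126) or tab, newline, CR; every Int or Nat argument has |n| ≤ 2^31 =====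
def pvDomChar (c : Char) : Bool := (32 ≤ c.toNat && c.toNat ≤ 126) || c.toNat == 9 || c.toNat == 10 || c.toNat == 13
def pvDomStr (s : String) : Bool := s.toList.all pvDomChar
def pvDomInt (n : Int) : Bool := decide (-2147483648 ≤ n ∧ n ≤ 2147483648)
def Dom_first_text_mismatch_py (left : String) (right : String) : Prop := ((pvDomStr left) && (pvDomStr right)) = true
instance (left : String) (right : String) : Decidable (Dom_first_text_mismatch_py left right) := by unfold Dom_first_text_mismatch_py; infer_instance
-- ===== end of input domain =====

-- B finds the common-prefix length by binary search with whole-slice equality probes (a different algorithm from A's index loop).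


-- ===== PORT A =====
-- the 'for idx in range(min_len): if left[idx] != right[idx]: return idx' loop
def pvALoop (l r : List Char) (idx stop : Int) : Option Int :=
  if _h : idx < stop then
    if PySem.List.pyGet? l idx ≠ PySem.List.pyGet? r idx then some idx
    else pvALoop l r (idx + 1) stop
  else none
termination_by (stop - idx).toNat
decreasing_by omega

def first_text_mismatch_py (left : String) (right : String) : Option Int :=
  match pvALoop left.toList right.toList 0 (min (left.toList.length : Int) (right.toList.length : Int)) with
  | some i => some i
  | none =>
      if (left.toList.length : Int) ≠ (right.toList.length : Int) then
        some (min (left.toList.length : Int) (right.toList.length : Int))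
      else none

-- ===== PORT B =====
-- midpoint bounds needed by the binary search's termination
lemma pv_mid_bounds (lo hi : Int) (h : lo < hi) :
    lo < PySem.Int.floordiv (lo + hi + 1) 2 ∧ PySem.Int.floordiv (lo + hi + 1) 2 ≤ hi := by
  rw [PySem.Int.floordiv_eq_ediv_of_pos (by omega : (0:Int) < 2)]
  omega

-- the 'while lo < hi: mid = (lo+hi+1)//2; if left[:mid] == right[:mid]: lo = mid else: hi = mid-1' loop
def pvBSearch (l r : List Char) (lo hi : Int) : Int :=
  if h : lo < hi then
    let mid := PySem.Int.floordiv (lo + hi + 1) 2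
    if PySem.List.slice l none (some mid) = PySem.List.slice r none (some mid) then
      pvBSearch l r mid hi
    else pvBSearch l r lo (mid - 1)
  else lo
termination_by (hi - lo).toNat
decreasing_by
· have := pv_mid_bounds lo hi h; omega
· have := pv_mid_bounds lo hi h; omega

def first_text_mismatch_py_alt (left : String) (right : String) : Option Int :=
  let lo := pvBSearch left.toList right.toList 0 (min (left.toList.length : Int) (right.toList.length : Int))
  if lo = (left.toList.length : Int) ∧ (left.toList.length : Int) = (right.toList.length : Int) then none
  else some lo

-- ===== PRECONDITION & SPEC =====
def Spec_first_text_mismatch_py (left : String) (right : String) (out : Option Int) : Prop := out = first_text_mismatch_py_alt left right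
instance (left : String) (right : String) (out : Option Int) : Decidable (Spec_first_text_mismatch_py left right out) := by unfold Spec_first_text_mismatch_py; infer_instance

-- ===== CLAIM =====
def Claim_equal_first_text_mismatch_py : Prop := ∀ (left : String) (right : String), Dom_first_text_mismatch_py left right → Spec_first_text_mismatch_py left right (first_text_mismatch_py left right)

-- ===== LEMMAS AND PROOFS =====
-- length of the common leading prefix
def pvCp : List Char → List Char → Nat
  | a :: l, b :: r => if a = b then pvCp l r + 1 else 0
  | _, _ => 0

lemma pvCp_le : ∀ (l r : List Char), pvCp l r ≤ min l.length r.length := by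
  intro l
  induction l with
  | nil => intro r; simp [pvCp]
  | cons a l ih =>
      intro r
      cases r with
      | nil => simp [pvCp]
      | cons b r =>
          have := ih r
          by_cases h : a = b
          · simp [pvCp, h]; omega
          · simp [pvCp, h]

lemma pvCp_take : ∀ (l r : List Char) (k : Nat), k ≤ min l.length r.length →
    (l.take k = r.take k ↔ k ≤ pvCp l r) := by
  intro l
  induction l with
  | nil =>
      intro r k hk
      simp at hk
      subst hk
      simp
  | cons a l ih =>
      intro r k hk
      cases r with
      | nil => simp at hk; subst hk; simp
      | cons b r =>
          cases k with
          | zero => simp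
          | succ k =>
              by_cases h : a = b
              · subst h
                have hk' : k ≤ min l.length r.length := by simp at hk; omega
                simp only [List.take_succ_cons, List.cons.injEq, true_and]
                rw [ih r k hk']
                simp [pvCp]
              · simp only [List.take_succ_cons, List.cons.injEq]
                simp [pvCp, h]

lemma pvCp_get_eq : ∀ (l r : List Char) (i : Nat), i < pvCp l r →
    l[i]? = r[i]? := by
  intro l
  induction l with
  | nil => intro r i hi; simp [pvCp] at hi
  | cons a l ih =>
      intro r i hi
      cases r with
      | nil => simp [pvCp] at hi
      | cons b r =>
          by_cases h : a = b
          · subst h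
            cases i with
            | zero => simp
            | succ i =>
                simp only [List.getElem?_cons_succ]
                exact ih r i (by simp [pvCp] at hi; omega)
          · simp [pvCp, h] at hi

lemma pvCp_get_ne : ∀ (l r : List Char), pvCp l r < min l.length r.length →
    l[pvCp l r]? ≠ r[pvCp l r]? := by
  intro l
  induction l with
  | nil => intro r h; simp at h
  | cons a l ih =>
      intro r h
      cases r with
      | nil => simp at h
      | cons b r =>
          by_cases hab : a = b
          · subst hab
            have h' : pvCp l r < min l.length r.length := by simp [pvCp] at h; omega
            have hcp : pvCp (a :: l) (a :: r) = pvCp l r + 1 := by simp [pvCp]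
            rw [hcp]
            simp only [List.getElem?_cons_succ]
            exact ih r h'
          · have hcp : pvCp (a :: l) (b :: r) = 0 := by simp [pvCp, hab]
            rw [hcp]
            simp [hab]

lemma pvALoop_eq (l r : List Char) (n : Int) (hn : n = min (l.length : Int) (r.length : Int))
    (i : Int) (h0 : 0 ≤ i) (hcp : i ≤ (pvCp l r : Int)) :
    pvALoop l r i n = if (pvCp l r : Int) < n then some (pvCp l r : Int) else none := by
  have hle := pvCp_le l r
  obtain ⟨k, hk⟩ : ∃ k, (n - i).toNat = k := ⟨_, rfl⟩
  induction k generalizing i with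
  | zero =>
      have hin : ¬ i < n := by omega
      rw [pvALoop, dif_neg hin]
      have : ¬ (pvCp l r : Int) < n := by
        rw [hn]; omega
      rw [if_neg this]
  | succ k ih =>
      have hin : i < n := by omega
      rw [pvALoop, dif_pos hin]
      by_cases hic : i < (pvCp l r : Int)
      · have h1 : l[i.toNat]? = r[i.toNat]? := pvCp_get_eq l r i.toNat (by omega)
        have hgeteq : PySem.List.pyGet? l i = PySem.List.pyGet? r i := by
          have hi' : i = (i.toNat : Int) := by omega
          rw [hi', PySem.List.pyGet?_natCast, PySem.List.pyGet?_natCast, h1]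
        rw [if_neg (by simp [hgeteq])]
        exact ih (i + 1) (by omega) (by omega) (by omega)
      · have hieq : i = (pvCp l r : Int) := by omega
        have hcpn : pvCp l r < min l.length r.length := by
          rw [hn] at hin; omega
        have h1 : l[i.toNat]? ≠ r[i.toNat]? := by
          have h2 : i.toNat = pvCp l r := by omega
          rw [h2]; exact pvCp_get_ne l r hcpn
        have hgetne : PySem.List.pyGet? l i ≠ PySem.List.pyGet? r i := by
          have hi' : i = (i.toNat : Int) := by omega
          rw [hi', PySem.List.pyGet?_natCast, PySem.List.pyGet?_natCast]
          exact h1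
        rw [if_pos (by simp [hgetne]), hieq, if_pos (by rw [← hieq]; exact hin)]

lemma pvBSearch_eq (l r : List Char) (k : Nat) : ∀ (lo hi : Int),
    (hi - lo).toNat = k → 0 ≤ lo → lo ≤ (pvCp l r : Int) → (pvCp l r : Int) ≤ hi →
    hi ≤ min (l.length : Int) (r.length : Int) →
    pvBSearch l r lo hi = (pvCp l r : Int) := by
  induction k using Nat.strong_induction_on with
  | _ k ih =>
    intro lo hi hk h0 hlo hhi hmin
    rw [pvBSearch]
    by_cases h : lo < hi
    · obtain ⟨hm1, hm2⟩ := pv_mid_bounds lo hi h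
      simp only [dif_pos h]
      set mid := PySem.Int.floordiv (lo + hi + 1) 2 with hmid
      have hsl : PySem.List.slice l none (some mid) = l.take mid.toNat :=
        PySem.List.slice_to _ (by omega)
      have hsr : PySem.List.slice r none (some mid) = r.take mid.toNat :=
        PySem.List.slice_to _ (by omega)
      rw [hsl, hsr]
      have htake : (l.take mid.toNat = r.take mid.toNat) ↔ mid.toNat ≤ pvCp l r := by
        refine pvCp_take l r mid.toNat ?_
        omega
      by_cases hc : l.take mid.toNat = r.take mid.toNat
      · rw [if_pos hc]
        have hm : mid ≤ (pvCp l r : Int) := by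
          have := htake.mp hc; omega
        exact ih (hi - mid).toNat (by omega) mid hi rfl (by omega) hm hhi hmin
      · rw [if_neg hc]
        have hm : (pvCp l r : Int) < mid := by
          have : ¬ mid.toNat ≤ pvCp l r := fun hx => hc (htake.mpr hx)
          omega
        exact ih (mid - 1 - lo).toNat (by omega) lo (mid - 1) rfl h0 hlo (by omega) (by omega)
    · rw [dif_neg h]
      omega

-- ===== VERDICT =====
theorem first_text_mismatch_py_spec : Claim_equal_first_text_mismatch_py := by
  intro left right _
  unfold Spec_first_text_mismatch_py first_text_mismatch_py first_text_mismatch_py_alt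
  set l := left.toList
  set r := right.toList
  have hcple := pvCp_le l r
  rw [pvALoop_eq l r _ rfl 0 le_rfl (by positivity),
      pvBSearch_eq l r _ 0 _ rfl le_rfl (by positivity) (by omega) le_rfl]
  by_cases h : (pvCp l r : Int) < min (l.length : Int) (r.length : Int)
  · have hne : ¬ ((pvCp l r : Int) = (l.length : Int) ∧ (l.length : Int) = (r.length : Int)) := by
      push_cast at h ⊢; omega
    rw [if_pos h, if_neg hne]
  · rw [if_neg h]
    have hcp : (pvCp l r : Int) = min (l.length : Int) (r.length : Int) := by
      push_cast at h hcple ⊢; omega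
    by_cases hlen : (l.length : Int) = (r.length : Int)
    · have h1 : (pvCp l r : Int) = (l.length : Int) := by omega
      simp [hlen, h1]
    · simp [hlen, hcp]
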